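-- pv_equiv track=rewrite | github.com/shoutrix/loom | tools/paper_search/roots.py | _compute_reachability
-- ===== SOURCE A (Python) =====
-- def _compute_reachability(
--     seed_ids: list[str],
--     edges: dict[str, list[tuple[str, bool, list[str]]]],
-- ) -> dict[str, set[str]]:
--     """For each seed, compute the set of papers reachable by following references backward.
--
--     Returns {seed_id: set of reachable paper_ids}.
--     """
--     reachable: dict[str, set[str]] = {}
--     for sid in seed_ids:
--         visited: set[str] = set()
--         stack = [sid]
--         while stack:
--             current = stack.pop()
--             if current in visited:
--                 continue
--             visited.add(current)
--             for parent_id, _, _ in edges.get(current, []):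
--                 if parent_id not in visited:
--                     stack.append(parent_id)
--         reachable[sid] = visited
--     return reachable
-- ===== SOURCE B (Python) =====
-- def _compute_reachability(
--     seed_ids: list[str],
--     edges: dict[str, list[tuple[str, bool, list[str]]]],
-- ) -> dict[str, set[str]]:
--     """For each seed, compute the set of papers reachable by following references backward.
--
--     Alternative decomposition: first strip the edge metadata into a plain
--     adjacency map of parent-id lists, then run a mutually recursive DFS
--     (visit one node / visit a list of pending nodes) that marks a node on
--     entry, and build the result as a comprehension over the deduplicated
--     seeds.  Neighbours are explored right-to-left (LIFO), so the reachable
--     sets are exactly those of a stack-based traversal.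
--     """
--     adj = {pid: [parent for parent, _, _ in lst] for pid, lst in edges.items()}
--
--     def visit(node, visited):
--         if node in visited:
--             return visited
--         return visit_all(list(reversed(adj.get(node, []))), visited | {node})
--
--     def visit_all(pending, visited):
--         if not pending:
--             return visited
--         return visit_all(pending[1:], visit(pending[0], visited))
--
--     return {sid: visit(sid, set()) for sid in dict.fromkeys(seed_ids)}
-- ===== Notes on version B (the rewrite author's own statement) =====
-- stated objective: alternative
-- what changed: Replaces the explicit stack + while-loop worklist and dict-by-insertion output with a precomputed plain adjacency map, a mutually recursive DFS (visit one node / visit a pending list, marking on entry), and a comprehension over the deduplicated seeds.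
import Mathlib
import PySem

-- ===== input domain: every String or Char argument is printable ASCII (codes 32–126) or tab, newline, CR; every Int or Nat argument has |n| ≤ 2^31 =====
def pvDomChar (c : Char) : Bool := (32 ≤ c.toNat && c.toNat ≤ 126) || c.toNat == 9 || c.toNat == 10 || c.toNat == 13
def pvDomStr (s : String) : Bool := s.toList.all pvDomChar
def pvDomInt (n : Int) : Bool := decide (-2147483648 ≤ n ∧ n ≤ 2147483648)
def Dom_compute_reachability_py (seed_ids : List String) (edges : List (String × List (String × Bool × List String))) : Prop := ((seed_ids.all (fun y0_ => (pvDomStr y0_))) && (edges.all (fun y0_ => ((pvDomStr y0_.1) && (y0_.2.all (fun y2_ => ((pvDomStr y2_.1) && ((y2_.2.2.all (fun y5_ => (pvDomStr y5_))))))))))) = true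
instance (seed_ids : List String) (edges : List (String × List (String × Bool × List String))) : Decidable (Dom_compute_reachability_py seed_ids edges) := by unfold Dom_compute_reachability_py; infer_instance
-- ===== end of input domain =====

-- B replaces A's explicit stack/while worklist and dict-by-insertion output by a precomputed
-- adjacency map, a mutually recursive DFS (mark-on-entry), and a map over the deduplicated
-- seeds (alternative decomposition, same cost); the results are proved identical.

-- ===== PORT A =====
-- total number of adjacency entries; used only as a fuel bound making A's loop total
def adjLen (edges : List (String × List (String × Bool × List String))) : Nat :=
  edges.foldl (fun a kv => a + kv.2.length) 0

-- A's while loop; the stack is held head-as-top (Python appends and pops at the right end); fuel is a totality guard only, proved sufficient below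
def loopA (edges : List (String × List (String × Bool × List String))) :
    Nat → List String → PySem.Set String → PySem.Set String
  | 0, _, v => v
  | _ + 1, [], v => v
  | f + 1, c :: st, v =>
    if PySem.Set.contains v c then loopA edges f st v
    else
      loopA edges f
        (((PySem.Dict.mk edges).getD c []).foldl
          (fun s t => if PySem.Set.contains (PySem.Set.add v c) t.1 then s else t.1 :: s) st)
        (PySem.Set.add v c)

def compute_reachability_py (seed_ids : List String) (edges : List (String × List (String × Bool × List String))) : List (String × List String) :=
  (seed_ids.foldl
    (fun (d : PySem.Dict String (List String)) sid =>
      d.insert sid (loopA edges (1 + (1 + adjLen edges) * (1 + adjLen edges)) [sid] PySem.Set.empty))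
    PySem.Dict.empty).items

-- ===== PORT B =====
-- B strips the metadata first: adj = {pid: [parent for parent, _, _ in lst] for pid, lst in edges.items()}
def adjB (edges : List (String × List (String × Bool × List String))) : List (String × List String) :=
  edges.map (fun kv => (kv.1, kv.2.map (fun t => t.1)))

-- B's mutually recursive visit / visit_all helpers (mark on entry, recurse over the reversed
-- neighbour list held as an explicit pending list); fuel is a totality guard only, proved sufficient below
mutual
def visitB (adj : List (String × List String)) : Nat → String → PySem.Set String → PySem.Set String
  | 0, _, visited => visited
  | f + 1, node, visited =>
    if PySem.Set.contains visited node then visited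
    else visitAllB adj f (((PySem.Dict.mk adj).getD node []).reverse) (PySem.Set.add visited node)
  termination_by f _ _ => (f, 0)

def visitAllB (adj : List (String × List String)) : Nat → List String → PySem.Set String → PySem.Set String
  | _, [], visited => visited
  | f, n :: pending, visited => visitAllB adj f pending (visitB adj f n visited)
  termination_by f l _ => (f, l.length + 1)
end

-- fuel actually supplied: one unit per distinct node, bounded by the adjacency entries
def fuelB (adj : List (String × List String)) : Nat :=
  adj.foldl (fun a kv => a + kv.2.length) 0 + 2

def compute_reachability_py_alt (seed_ids : List String) (edges : List (String × List (String × Bool × List String))) : List (String × List String) :=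
  (PySem.List.dedup seed_ids).map
    (fun sid => (sid, visitB (adjB edges) (fuelB (adjB edges)) sid PySem.Set.empty))

-- ===== PRECONDITION & SPEC =====
def Spec_compute_reachability_py (seed_ids : List String) (edges : List (String × List (String × Bool × List String))) (out : List (String × List String)) : Prop := out = compute_reachability_py_alt seed_ids edges
instance (seed_ids : List String) (edges : List (String × List (String × Bool × List String))) (out : List (String × List String)) : Decidable (Spec_compute_reachability_py seed_ids edges out) := by unfold Spec_compute_reachability_py; infer_instance

-- ===== CLAIM (what is proved, stated in full; the proofs are below) =====
def Claim_equal_compute_reachability_py : Prop := ∀ (seed_ids : List String) (edges : List (String × List (String × Bool × List String))), Dom_compute_reachability_py seed_ids edges → Spec_compute_reachability_py seed_ids edges (compute_reachability_py seed_ids edges)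

-- ===== LEMMAS AND PROOFS =====

-- neighbour ids of a node, and all parent ids occurring anywhere in edges
def nb (edges : List (String × List (String × Bool × List String))) (c : String) : List String :=
  ((PySem.Dict.mk edges).getD c []).map (·.1)

def parentsL (edges : List (String × List (String × Bool × List String))) : List String :=
  edges.flatMap (fun kv => kv.2.map (·.1))

theorem adjLen_aux (edges : List (String × List (String × Bool × List String))) :
    ∀ a : Nat, edges.foldl (fun a kv => a + kv.2.length) a = a + (parentsL edges).length := by
  induction edges with
  | nil => intro a; simp [parentsL]
  | cons kv rest ih =>
    intro a
    simp [parentsL, List.foldl_cons, ih, List.flatMap_cons]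
    omega

theorem len_parentsL (edges : List (String × List (String × Bool × List String))) :
    (parentsL edges).length = adjLen edges := by
  simpa [adjLen] using (adjLen_aux edges 0).symm

-- B's stripped adjacency map looks up to exactly the parent ids of A's lookup
theorem adjB_getD (edges : List (String × List (String × Bool × List String))) (c : String) :
    (PySem.Dict.mk (adjB edges)).getD c [] = nb edges c := by
  induction edges with
  | nil => simp [adjB, nb, PySem.Dict.getD, PySem.Dict.get?]
  | cons kv rest ih =>
    obtain ⟨k, vl⟩ := kv
    simp only [adjB, List.map_cons, nb, PySem.Dict.getD_eq_get?_getD, PySem.Dict.get?_mk_cons]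
    by_cases h : (k == c)
    · rw [if_pos h, if_pos h]; simp
    · rw [if_neg h, if_neg h]
      simpa [adjB, nb, PySem.Dict.getD_eq_get?_getD] using ih

-- B's fuel equals A's entry count plus two
theorem fuelB_adjB (edges : List (String × List (String × Bool × List String))) :
    fuelB (adjB edges) = adjLen edges + 2 := by
  have h : ∀ (es : List (String × List (String × Bool × List String))) (a : Nat),
      (adjB es).foldl (fun a kv => a + kv.2.length) a = es.foldl (fun a kv => a + kv.2.length) a := by
    intro es
    induction es with
    | nil => intro a; simp [adjB]
    | cons kv rest ih => intro a; simpa [adjB, List.foldl_cons] using ih (a + kv.2.length)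
  simp [fuelB, adjLen, h]

theorem nb_sub (edges : List (String × List (String × Bool × List String))) (c : String) :
    ∀ x ∈ nb edges c, x ∈ parentsL edges := by
  induction edges with
  | nil => intro x hx; simp [nb, PySem.Dict.getD, PySem.Dict.get?] at hx
  | cons kv rest ih =>
    obtain ⟨k, vl⟩ := kv
    intro x hx
    simp only [nb, PySem.Dict.getD_eq_get?_getD, PySem.Dict.get?_mk_cons] at hx
    simp only [parentsL, List.flatMap_cons, List.mem_append]
    by_cases h : (k == c)
    · left; rw [if_pos h] at hx; simpa using hx
    · right
      rw [if_neg h] at hx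
      exact ih x (by simpa [nb, PySem.Dict.getD_eq_get?_getD] using hx)

theorem nb_len (edges : List (String × List (String × Bool × List String))) (c : String) :
    (nb edges c).length ≤ adjLen edges := by
  induction edges with
  | nil => simp [nb, PySem.Dict.getD, PySem.Dict.get?]
  | cons kv rest ih =>
    obtain ⟨k, vl⟩ := kv
    rw [← len_parentsL] at ih ⊢
    simp only [nb, PySem.Dict.getD_eq_get?_getD, PySem.Dict.get?_mk_cons] at ih ⊢
    simp only [parentsL, List.flatMap_cons, List.length_append]
    by_cases h : (k == c)
    · rw [if_pos h]; simp
    · rw [if_neg h]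
      calc _ ≤ (parentsL rest).length := by
              simpa [nb, parentsL, PySem.Dict.getD_eq_get?_getD] using ih
        _ ≤ _ := by simp [parentsL]

-- fuel-free model of A's loop (well-founded on (unvisited nodes, stack length))
def loopM (edges : List (String × List (String × Bool × List String))) :
    List String → PySem.Set String → PySem.Set String
  | [], v => v
  | c :: st, v =>
    if PySem.Set.contains v c then loopM edges st v
    else
      loopM edges
        (((nb edges c).filter (fun p => !(PySem.Set.contains (PySem.Set.add v c) p))).reverse ++ st)
        (PySem.Set.add v c)
  termination_by st v => ((((st.toFinset ∪ (parentsL edges).toFinset) \ v.toFinset).card, st.length))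
  decreasing_by
  · have hsub : ((st.toFinset ∪ (parentsL edges).toFinset) \ v.toFinset)
        ⊆ (((c :: st).toFinset ∪ (parentsL edges).toFinset) \ v.toFinset) := by
      intro x hx
      simp only [Finset.mem_sdiff, Finset.mem_union, List.mem_toFinset, List.mem_cons] at hx ⊢
      tauto
    rcases lt_or_eq_of_le (Finset.card_le_card hsub) with h | h
    · exact Prod.Lex.left _ _ h
    · rw [h]; exact Prod.Lex.right _ (by simp)
  · apply Prod.Lex.left
    apply Finset.card_lt_card
    have hc : c ∈ (PySem.Set.add v c) := by simp [PySem.Set.mem_add]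
    constructor
    · intro x hx
      simp only [Finset.mem_sdiff, Finset.mem_union, List.mem_toFinset, List.mem_cons,
        List.mem_append, List.mem_reverse, List.mem_filter] at hx ⊢
      obtain ⟨hx1, hx2⟩ := hx
      have hxv : x ∉ v := fun hv => hx2 (by simp [PySem.Set.mem_add, hv])
      refine ⟨?_, hxv⟩
      rcases hx1 with (hf | hst) | hp
      · exact Or.inr (nb_sub edges c x hf.1)
      · exact Or.inl (Or.inr hst)
      · exact Or.inr hp
    · intro hsub
      have : c ∈ (((c :: st).toFinset ∪ (parentsL edges).toFinset) \ v.toFinset) := by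
        simp only [Finset.mem_sdiff, Finset.mem_union, List.mem_toFinset, List.mem_cons]
        refine ⟨Or.inl (by simp), ?_⟩
        intro hv
        simp_all
      have := hsub this
      simp only [Finset.mem_sdiff, List.mem_toFinset] at this
      exact this.2 hc

-- B's pending-list helper is a fold of single visits
theorem visitAllB_eq_foldl (adj : List (String × List String)) (f : Nat) :
    ∀ (l : List String) (v : PySem.Set String),
      visitAllB adj f l v = l.foldl (fun acc n => visitB adj f n acc) v := by
  intro l
  induction l with
  | nil => intro v; rw [visitAllB]; simp
  | cons n l ih => intro v; rw [visitAllB, List.foldl_cons, ih]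

theorem visitB_skip (adj : List (String × List String)) (f : Nat)
    (n : String) (v : PySem.Set String) (h : n ∈ v) : visitB adj f n v = v := by
  cases f with
  | zero => rw [visitB]
  | succ f => rw [visitB]; simp [h]

theorem foldB_mono (adj : List (String × List String)) (f : Nat)
    (hf : ∀ (n : String) (v : PySem.Set String) (x : String), x ∈ v → x ∈ visitB adj f n v) :
    ∀ (l : List String) (v : PySem.Set String) (x : String), x ∈ v →
      x ∈ l.foldl (fun acc n => visitB adj f n acc) v := by
  intro l
  induction l with
  | nil => intro v x hx; exact hx
  | cons n l ih => intro v x hx; exact ih _ _ (hf n v x hx)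

theorem visitB_mono (adj : List (String × List String)) :
    ∀ (f : Nat) (n : String) (v : PySem.Set String) (x : String), x ∈ v → x ∈ visitB adj f n v := by
  intro f
  induction f with
  | zero => intro n v x hx; rw [visitB]; exact hx
  | succ f ih =>
    intro n v x hx
    rw [visitB]
    by_cases h : n ∈ v
    · simpa [h] using hx
    · simp only [h, PySem.Set.contains_iff]
      rw [visitAllB_eq_foldl]
      exact foldB_mono adj f ih _ _ x (by simp [PySem.Set.mem_add, hx])

theorem sdiff_add_lt (dom : Finset String) (v : PySem.Set String) (n : String)
    (hn : n ∈ dom) (hnv : n ∉ v) :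
    (dom \ (PySem.Set.add v n).toFinset).card < (dom \ v.toFinset).card := by
  apply Finset.card_lt_card
  constructor
  · intro x hx
    simp only [Finset.mem_sdiff, List.mem_toFinset, PySem.Set.mem_add] at hx ⊢
    exact ⟨hx.1, fun h => hx.2 (Or.inl h)⟩
  · intro hsub
    have : n ∈ dom \ v.toFinset := by
      simp only [Finset.mem_sdiff, List.mem_toFinset]; exact ⟨hn, hnv⟩
    have := hsub this
    simp [PySem.Set.mem_add] at this

-- the visited-at-push filter of A is redundant for a sequence of visit calls
theorem fold_filter (adj : List (String × List String)) (f : Nat) :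
    ∀ (l : List String) (v0 v : PySem.Set String), (∀ x ∈ v0, x ∈ v) →
      (l.filter (fun p => !(PySem.Set.contains v0 p))).foldl (fun acc p => visitB adj f p acc) v
        = l.foldl (fun acc p => visitB adj f p acc) v := by
  intro l
  induction l with
  | nil => intro v0 v _; rfl
  | cons p l ih =>
    intro v0 v hsub
    by_cases h : p ∈ v0
    · rw [List.filter_cons_of_neg (by simp [h]), List.foldl_cons,
        visitB_skip adj f p v (hsub p h)]
      exact ih v0 v hsub
    · rw [List.filter_cons_of_pos (by simp [h]), List.foldl_cons, List.foldl_cons]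
      exact ih v0 _ (fun x hx => visitB_mono adj f p v x (hsub x hx))

-- the crux: popping one node from A's stack = one recursive visit call of B
theorem loopM_visitB (edges : List (String × List (String × Bool × List String))) (dom : Finset String)
    (hnb : ∀ c x, x ∈ nb edges c → x ∈ dom) :
    ∀ (k : Nat), ∀ (v : PySem.Set String) (n : String) (st : List String) (f : Nat), n ∈ dom →
      (dom \ v.toFinset).card ≤ k → k < f →
      loopM edges (n :: st) v = loopM edges st (visitB (adjB edges) f n v) := by
  intro k
  induction k using Nat.strong_induction_on with
  | _ k ih =>
    intro v n st f hn hk hf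
    obtain ⟨f', rfl⟩ : ∃ f', f = f' + 1 := ⟨f - 1, by omega⟩
    by_cases h : n ∈ v
    · rw [visitB_skip _ _ _ _ h, loopM]
      simp only [h, PySem.Set.contains_iff, if_pos]
    · have hkpos : 1 ≤ (dom \ v.toFinset).card := by
        have : n ∈ dom \ v.toFinset := by
          simp only [Finset.mem_sdiff, List.mem_toFinset]; exact ⟨hn, h⟩
        exact Finset.card_pos.2 ⟨n, this⟩
      have hv' : (dom \ (PySem.Set.add v n).toFinset).card ≤ k - 1 := by
        have := sdiff_add_lt dom v n hn h
        omega
      have inner : ∀ (l : List String) (st₂ : List String) (acc : PySem.Set String),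
          (∀ p ∈ l, p ∈ dom) → (dom \ acc.toFinset).card ≤ k - 1 →
          loopM edges (l ++ st₂) acc
            = loopM edges st₂ (l.foldl (fun a p => visitB (adjB edges) f' p a) acc) := by
        intro l
        induction l with
        | nil => intro st₂ acc _ _; rfl
        | cons p l ihl =>
          intro st₂ acc hdom hacc
          rw [List.cons_append, ih (k - 1) (by omega) acc p (l ++ st₂) f'
            (hdom p (by simp)) hacc (by omega), List.foldl_cons]
          apply ihl _ _ (fun p' hp' => hdom p' (by simp [hp']))
          calc (dom \ (visitB (adjB edges) f' p acc).toFinset).card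
              ≤ (dom \ acc.toFinset).card := by
                apply Finset.card_le_card
                intro x hx
                simp only [Finset.mem_sdiff, List.mem_toFinset] at hx ⊢
                exact ⟨hx.1, fun hmem => hx.2 (visitB_mono (adjB edges) f' p acc x hmem)⟩
            _ ≤ k - 1 := hacc
      rw [loopM]
      simp only [h, PySem.Set.contains_iff]
      rw [inner _ _ _ ?side hv']
      case side =>
        intro p hp
        simp only [List.mem_reverse, List.mem_filter] at hp
        exact hnb n p hp.1
      rw [← List.filter_reverse, fold_filter (adjB edges) f' _ _ _ (fun x hx => hx)]
      rw [visitB]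
      simp only [h, PySem.Set.contains_iff]
      rw [adjB_getD, visitAllB_eq_foldl]
      simp

theorem push_eq (l : List (String × Bool × List String)) (v' : PySem.Set String) :
    ∀ st : List String,
      l.foldl (fun s t => if PySem.Set.contains v' t.1 then s else t.1 :: s) st
        = ((l.map (·.1)).filter (fun p => !(PySem.Set.contains v' p))).reverse ++ st := by
  induction l with
  | nil => intro st; simp
  | cons t l ih =>
    intro st
    rw [List.foldl_cons, ih]
    by_cases h : t.1 ∈ v'
    · simp [h]
    · simp [h]

-- A's fueled loop equals the model once the fuel covers the remaining work
theorem loopA_eq_loopM (edges : List (String × List (String × Bool × List String))) (dom : Finset String)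
    (hnb : ∀ c x, x ∈ nb edges c → x ∈ dom) :
    ∀ (f : Nat) (st : List String) (v : PySem.Set String), (∀ x ∈ st, x ∈ dom) →
      st.length + (1 + adjLen edges) * ((dom \ v.toFinset).card) ≤ f →
      loopA edges f st v = loopM edges st v := by
  intro f
  induction f with
  | zero =>
    intro st v _ hf
    have : st = [] := by
      cases st with
      | nil => rfl
      | cons a l => simp at hf
    subst this
    rw [loopA, loopM]
  | succ f ih =>
    intro st v hst hf
    cases st with
    | nil => rw [loopA, loopM]
    | cons c st' =>
      rw [loopA, loopM]
      by_cases h : c ∈ v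
      · have hct : PySem.Set.contains v c = true := (PySem.Set.contains_iff v c).2 h
        rw [if_pos hct, if_pos hct]
        apply ih _ _ (fun x hx => hst x (by simp [hx]))
        simp at hf ⊢
        omega
      · have hcn : ¬ (PySem.Set.contains v c = true) := by
          simp [h]
        rw [if_neg hcn, if_neg hcn]
        rw [push_eq]
        have hnbc : (nb edges c) = ((PySem.Dict.mk edges).getD c []).map (·.1) := rfl
        rw [← hnbc]
        apply ih
        · intro x hx
          rcases List.mem_append.1 hx with hx | hx
          · simp only [List.mem_reverse, List.mem_filter] at hx
            exact hnb c x hx.1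
          · exact hst x (by simp [hx])
        · have hR : (((nb edges c).filter
              (fun p => !(PySem.Set.contains (PySem.Set.add v c) p))).reverse).length
              ≤ adjLen edges := by
            calc _ ≤ (nb edges c).length := by
                  simpa using List.length_filter_le _ _
              _ ≤ adjLen edges := nb_len edges c
          have hc : c ∈ dom := hst c (by simp)
          have hK : (dom \ (PySem.Set.add v c).toFinset).card + 1
              ≤ (dom \ v.toFinset).card := by
            have := sdiff_add_lt dom v c hc h
            omega
          obtain ⟨K', hK'⟩ : ∃ K', (dom \ v.toFinset).card = K' + 1 :=
            ⟨(dom \ v.toFinset).card - 1, by omega⟩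
          have hmul : (1 + adjLen edges) * (K' + 1)
              = (1 + adjLen edges) * K' + (1 + adjLen edges) := by ring
          have hK2 : (dom \ (PySem.Set.add v c).toFinset).card ≤ K' := by omega
          have hmono : (1 + adjLen edges) * (dom \ (PySem.Set.add v c).toFinset).card
              ≤ (1 + adjLen edges) * K' := Nat.mul_le_mul_left _ hK2
          simp only [List.length_append, List.length_cons] at hf ⊢
          rw [hK', hmul] at hf
          omega

-- per seed, A's stack loop computes exactly B's recursive visit
theorem per_seed (edges : List (String × List (String × Bool × List String))) (s : String) :
    loopA edges (1 + (1 + adjLen edges) * (1 + adjLen edges)) [s] PySem.Set.empty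
      = visitB (adjB edges) (fuelB (adjB edges)) s PySem.Set.empty := by
  have hnb : ∀ c x, x ∈ nb edges c → x ∈ insert s (parentsL edges).toFinset := by
    intro c x hx
    exact Finset.mem_insert_of_mem (List.mem_toFinset.2 (nb_sub edges c x hx))
  have hcard : (insert s (parentsL edges).toFinset \ (PySem.Set.empty : PySem.Set String).toFinset).card
      ≤ 1 + adjLen edges := by
    calc _ ≤ (insert s (parentsL edges).toFinset).card := Finset.card_le_card (Finset.sdiff_subset)
      _ ≤ (parentsL edges).toFinset.card + 1 := Finset.card_insert_le _ _
      _ ≤ (parentsL edges).length + 1 := by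
          have := (parentsL edges).toFinset_card_le
          omega
      _ ≤ 1 + adjLen edges := by rw [len_parentsL]; omega
  have hb : ([s] : List String).length + (1 + adjLen edges) *
      ((insert s (parentsL edges).toFinset \ (PySem.Set.empty : PySem.Set String).toFinset).card)
      ≤ 1 + (1 + adjLen edges) * (1 + adjLen edges) := by
    simp only [List.length_cons, List.length_nil]
    nlinarith [hcard]
  rw [loopA_eq_loopM edges _ hnb _ [s] PySem.Set.empty (by simp) hb]
  rw [fuelB_adjB]
  rw [loopM_visitB edges _ hnb (1 + adjLen edges) PySem.Set.empty s [] (adjLen edges + 2)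
    (Finset.mem_insert_self _ _) hcard (by omega)]
  rw [loopM]

-- a dict built by inserting a key-determined value for each element lists the deduped keys with their values
theorem foldl_insert_get? (g : String → List String) :
    ∀ (ss : List String) (d : PySem.Dict String (List String)) (k : String),
      (ss.foldl (fun d s => d.insert s (g s)) d).get? k
        = if k ∈ ss then some (g k) else d.get? k := by
  intro ss
  induction ss with
  | nil => intro d k; simp
  | cons s ss ih =>
    intro d k
    rw [List.foldl_cons, ih]
    by_cases hm : k ∈ ss
    · simp [hm]
    · by_cases he : k = s
      · subst he
        simp [hm, PySem.Dict.get?_insert_self]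
      · simp [hm, he, PySem.Dict.get?_insert_of_ne _ _ he]

theorem items_fold_insert (g : String → List String) (ss : List String) :
    (ss.foldl (fun (d : PySem.Dict String (List String)) s => d.insert s (g s))
        PySem.Dict.empty).items
      = (PySem.List.dedup ss).map (fun s => (s, g s)) := by
  have hkeys : (ss.foldl (fun (d : PySem.Dict String (List String)) s => d.insert s (g s))
      PySem.Dict.empty).keys = PySem.List.dedup ss := by
    rw [PySem.Dict.keys_foldl_insert]
    simp [PySem.List.dedup_eq_ofList]
    rfl
  have hnd : (ss.foldl (fun (d : PySem.Dict String (List String)) s => d.insert s (g s))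
      PySem.Dict.empty).keys.Nodup := by
    rw [hkeys, PySem.List.dedup_eq_ofList]
    exact PySem.Set.nodup_ofList ss
  rw [PySem.Dict.items_eq_map_keys _ hnd [], hkeys]
  apply List.map_congr_left
  intro k hk
  have hmem : k ∈ ss := (PySem.List.mem_dedup ss k).1 hk
  simp [PySem.Dict.getD_eq_get?_getD, foldl_insert_get? g ss _ k, hmem]

-- ===== VERDICT (by name: the statement is the Claim_ definition above) =====
theorem compute_reachability_py_spec : Claim_equal_compute_reachability_py := by
  intro seed_ids edges _
  unfold Spec_compute_reachability_py compute_reachability_py compute_reachability_py_alt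
  rw [items_fold_insert
    (fun s => loopA edges (1 + (1 + adjLen edges) * (1 + adjLen edges)) [s] PySem.Set.empty)
    seed_ids]
  apply List.map_congr_left
  intro s _
  rw [per_seed]
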